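-- pv_equiv track=rewrite | github.com/MCFELA123/image-classify | backend/models/analytics_dashboard.py | _get_grade_distribution
-- ===== SOURCE A (Python) =====
-- from typing import Dict, List, Any, Optional
--
-- def _get_grade_distribution(classifications: List[Dict]) -> Dict[str, int]:
--     """Get quality grade distribution"""
--     distribution = {'A': 0, 'B': 0, 'C': 0, 'Reject': 0}
--
--     for c in classifications:
--         grade = c.get('quality_grade', 'C')
--         if grade in distribution:
--             distribution[grade] += 1
--         else:
--             distribution['C'] += 1
--
--     return distribution
-- ===== SOURCE B (Python) =====
-- def _get_grade_distribution(classifications):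
--     """Get quality grade distribution"""
--     grades = [c.get('quality_grade', 'C') for c in classifications]
--     return {
--         'A': grades.count('A'),
--         'B': grades.count('B'),
--         'C': sum(1 for g in grades if g not in ('A', 'B', 'Reject')),
--         'Reject': grades.count('Reject'),
--     }
-- ===== Notes on version B (the rewrite author's own statement) =====
-- stated objective: alternative
-- what changed: Replaces the single accumulating-dict pass with a grades projection followed by independent per-category count scans (C computed as everything not in {A,B,Reject}).
import Mathlib
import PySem

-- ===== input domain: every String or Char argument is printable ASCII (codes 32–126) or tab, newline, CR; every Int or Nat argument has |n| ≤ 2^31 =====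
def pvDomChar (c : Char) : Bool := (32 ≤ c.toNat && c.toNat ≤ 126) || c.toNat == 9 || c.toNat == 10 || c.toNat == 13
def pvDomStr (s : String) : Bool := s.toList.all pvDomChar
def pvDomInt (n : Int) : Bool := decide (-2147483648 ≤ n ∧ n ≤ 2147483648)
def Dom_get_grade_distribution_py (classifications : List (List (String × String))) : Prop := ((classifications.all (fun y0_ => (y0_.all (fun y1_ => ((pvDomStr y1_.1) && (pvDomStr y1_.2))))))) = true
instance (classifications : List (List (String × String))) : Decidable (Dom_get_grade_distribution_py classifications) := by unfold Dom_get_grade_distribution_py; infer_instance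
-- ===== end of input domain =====

-- B replaces A's single accumulating-dict pass by a grades projection plus independent per-category count scans (objective: alternative).

-- ===== PORT A =====
-- distribution = {'A':0,'B':0,'C':0,'Reject':0}; for c in classifications: grade = c.get(...); if-in-else; return distribution
def get_grade_distribution_py (classifications : List (List (String × String))) : List (String × Int) :=
  (classifications.foldl
    (fun distribution c =>
      let grade := (PySem.Dict.mk c).getD "quality_grade" "C"
      if distribution.contains grade then
        distribution.insert grade (distribution.getD grade 0 + 1)
      else
        distribution.insert "C" (distribution.getD "C" 0 + 1))
    (PySem.Dict.mk [("A", 0), ("B", 0), ("C", 0), ("Reject", 0)])).items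

-- ===== PORT B =====
-- grades = [c.get('quality_grade','C') for c in classifications]; independent counts per category
def get_grade_distribution_py_alt (classifications : List (List (String × String))) : List (String × Int) :=
  let grades := classifications.map (fun c => (PySem.Dict.mk c).getD "quality_grade" "C")
  [("A", (grades.count "A" : Int)),
   ("B", (grades.count "B" : Int)),
   ("C", ((grades.filter (fun g => !(g == "A" || g == "B" || g == "Reject"))).length : Int)),
   ("Reject", (grades.count "Reject" : Int))]

-- ===== PRECONDITION & SPEC =====
def Spec_get_grade_distribution_py (classifications : List (List (String × String))) (out : List (String × Int)) : Prop := out = get_grade_distribution_py_alt classifications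
instance (classifications : List (List (String × String))) (out : List (String × Int)) : Decidable (Spec_get_grade_distribution_py classifications out) := by unfold Spec_get_grade_distribution_py; infer_instance

-- ===== CLAIM (what is proved, stated in full; the proofs are below) =====
def Claim_equal_get_grade_distribution_py : Prop := ∀ (classifications : List (List (String × String))), Dom_get_grade_distribution_py classifications → Spec_get_grade_distribution_py classifications (get_grade_distribution_py classifications)

-- ===== LEMMAS AND PROOFS =====

-- The loop of A, generalized over the four running counters, in terms of the grade list.
theorem pv_loop (gs : List String) (a b c r : Int) :
    gs.foldl
      (fun distribution grade =>
        if distribution.contains grade then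
          distribution.insert grade (distribution.getD grade 0 + 1)
        else
          distribution.insert "C" (distribution.getD "C" 0 + 1))
      (PySem.Dict.mk [("A", a), ("B", b), ("C", c), ("Reject", r)])
    = PySem.Dict.mk [("A", a + gs.count "A"), ("B", b + gs.count "B"),
        ("C", c + ((gs.filter (fun g => !(g == "A" || g == "B" || g == "Reject"))).length : Int)),
        ("Reject", r + gs.count "Reject")] := by
  induction gs generalizing a b c r with
  | nil => simp
  | cons g gs ih =>
    by_cases hA : g = "A"
    · subst hA
      simp only [List.foldl_cons]
      rw [show (if (PySem.Dict.mk [("A", a), ("B", b), ("C", c), ("Reject", r)]).contains "A" then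
            (PySem.Dict.mk [("A", a), ("B", b), ("C", c), ("Reject", r)]).insert "A"
              ((PySem.Dict.mk [("A", a), ("B", b), ("C", c), ("Reject", r)]).getD "A" 0 + 1)
          else
            (PySem.Dict.mk [("A", a), ("B", b), ("C", c), ("Reject", r)]).insert "C"
              ((PySem.Dict.mk [("A", a), ("B", b), ("C", c), ("Reject", r)]).getD "C" 0 + 1))
          = PySem.Dict.mk [("A", a + 1), ("B", b), ("C", c), ("Reject", r)] from by
        simp [PySem.Dict.contains, PySem.Dict.insert, PySem.Dict.getD, PySem.Dict.get?]]
      rw [ih]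
      simp
      ring_nf
    · by_cases hB : g = "B"
      · subst hB
        simp only [List.foldl_cons]
        rw [show (if (PySem.Dict.mk [("A", a), ("B", b), ("C", c), ("Reject", r)]).contains "B" then
              (PySem.Dict.mk [("A", a), ("B", b), ("C", c), ("Reject", r)]).insert "B"
                ((PySem.Dict.mk [("A", a), ("B", b), ("C", c), ("Reject", r)]).getD "B" 0 + 1)
            else
              (PySem.Dict.mk [("A", a), ("B", b), ("C", c), ("Reject", r)]).insert "C"
                ((PySem.Dict.mk [("A", a), ("B", b), ("C", c), ("Reject", r)]).getD "C" 0 + 1))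
            = PySem.Dict.mk [("A", a), ("B", b + 1), ("C", c), ("Reject", r)] from by
          simp [PySem.Dict.contains, PySem.Dict.insert, PySem.Dict.getD, PySem.Dict.get?]]
        rw [ih]
        simp
        ring_nf
      · by_cases hR : g = "Reject"
        · subst hR
          simp only [List.foldl_cons]
          rw [show (if (PySem.Dict.mk [("A", a), ("B", b), ("C", c), ("Reject", r)]).contains "Reject" then
                (PySem.Dict.mk [("A", a), ("B", b), ("C", c), ("Reject", r)]).insert "Reject"
                  ((PySem.Dict.mk [("A", a), ("B", b), ("C", c), ("Reject", r)]).getD "Reject" 0 + 1)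
              else
                (PySem.Dict.mk [("A", a), ("B", b), ("C", c), ("Reject", r)]).insert "C"
                  ((PySem.Dict.mk [("A", a), ("B", b), ("C", c), ("Reject", r)]).getD "C" 0 + 1))
              = PySem.Dict.mk [("A", a), ("B", b), ("C", c), ("Reject", r + 1)] from by
            simp [PySem.Dict.contains, PySem.Dict.insert, PySem.Dict.getD, PySem.Dict.get?]]
          rw [ih]
          simp
          ring_nf
        · -- grade is "C" or unknown: either way the "C" bucket is incremented
          have step : (if (PySem.Dict.mk [("A", a), ("B", b), ("C", c), ("Reject", r)]).contains g then
                (PySem.Dict.mk [("A", a), ("B", b), ("C", c), ("Reject", r)]).insert g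
                  ((PySem.Dict.mk [("A", a), ("B", b), ("C", c), ("Reject", r)]).getD g 0 + 1)
              else
                (PySem.Dict.mk [("A", a), ("B", b), ("C", c), ("Reject", r)]).insert "C"
                  ((PySem.Dict.mk [("A", a), ("B", b), ("C", c), ("Reject", r)]).getD "C" 0 + 1))
              = PySem.Dict.mk [("A", a), ("B", b), ("C", c + 1), ("Reject", r)] := by
            by_cases hC : g = "C"
            · subst hC
              simp [PySem.Dict.contains, PySem.Dict.insert, PySem.Dict.getD, PySem.Dict.get?]
            · have hA' : ¬("A" = g) := fun h => hA h.symm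
              have hB' : ¬("B" = g) := fun h => hB h.symm
              have hC' : ¬("C" = g) := fun h => hC h.symm
              have hR' : ¬("Reject" = g) := fun h => hR h.symm
              simp [PySem.Dict.contains, PySem.Dict.insert, PySem.Dict.getD, PySem.Dict.get?,
                hA', hB', hC', hR']
          simp only [List.foldl_cons]
          rw [step, ih]
          simp [hA, hB, hR]
          ring_nf

-- ===== VERDICT (by name: the statement is the Claim_ definition above) =====
theorem get_grade_distribution_py_spec : Claim_equal_get_grade_distribution_py := by
  intro classifications _
  unfold Spec_get_grade_distribution_py get_grade_distribution_py get_grade_distribution_py_alt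
  have h := pv_loop (classifications.map (fun c => (PySem.Dict.mk c).getD "quality_grade" "C")) 0 0 0 0
  rw [List.foldl_map] at h
  refine (congrArg PySem.Dict.items h).trans ?_
  simp
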